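-- pv_equiv track=rewrite | github.com/facelesstrends02-AP/TrendingTopics | tools/generate_seo_metadata.py | compute_segment_timestamps
-- ===== SOURCE A (Python) =====
-- def compute_segment_timestamps(segments):
--     """Return list of 'M:SS' timestamp strings, one per segment."""
--     timestamps = []
--     cumulative_seconds = 0
--     for seg in segments:
--         mins = cumulative_seconds // 60
--         secs = cumulative_seconds % 60
--         timestamps.append(f"{mins}:{secs:02d}")
--         cumulative_seconds += seg.get("duration_estimate", 20)
--     return timestamps
-- ===== SOURCE B (Python) =====
-- def compute_segment_timestamps(segments):
--     """Return list of 'M:SS' timestamp strings, one per segment."""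
--     durations = [seg.get("duration_estimate", 20) for seg in segments]
--     offsets = [sum(durations[:i]) for i in range(len(durations))]
--     return ["{}:{:02d}".format(*divmod(offset, 60)) for offset in offsets]
-- ===== Notes on version B (the rewrite author's own statement) =====
-- stated objective: alternative
-- what changed: Replaced the single interleaved accumulator loop with three staged comprehensions: extract durations, build exclusive prefix-sum offsets, then format each offset via divmod.
import Mathlib
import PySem

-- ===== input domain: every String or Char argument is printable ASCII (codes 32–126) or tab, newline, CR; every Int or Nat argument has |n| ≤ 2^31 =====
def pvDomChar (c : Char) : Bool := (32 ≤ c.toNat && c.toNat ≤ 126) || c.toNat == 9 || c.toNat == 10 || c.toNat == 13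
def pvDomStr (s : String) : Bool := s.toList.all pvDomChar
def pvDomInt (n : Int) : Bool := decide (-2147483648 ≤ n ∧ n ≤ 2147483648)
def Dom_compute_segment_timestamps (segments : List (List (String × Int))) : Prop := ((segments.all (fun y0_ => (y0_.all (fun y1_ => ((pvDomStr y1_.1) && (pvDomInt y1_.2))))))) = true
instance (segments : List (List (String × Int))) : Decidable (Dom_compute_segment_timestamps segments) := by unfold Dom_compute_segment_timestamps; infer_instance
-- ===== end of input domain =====

-- B restages A's single accumulator loop as three comprehensions (durations, exclusive prefix-sum offsets, formatting); same values, different decomposition (objective: alternative).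

-- ===== PORT A =====
-- f"{s:02d}" hand-ported: exact for 0 ≤ s < 100, which covers every value reached here (s = cum % 60 ∈ [0, 60))
def pvFmt2 (s : Int) : String := if s < 10 then "0" ++ PySem.Int.toStr s else PySem.Int.toStr s

-- the body of A's for-loop (timestamps, cumulative_seconds are the fold state)
def pvStepA (st : List String × Int) (seg : List (String × Int)) : List String × Int :=
  let mins := PySem.Int.floordiv st.2 60
  let secs := PySem.Int.mod st.2 60
  (st.1 ++ [PySem.Int.toStr mins ++ ":" ++ pvFmt2 secs],
   st.2 + (PySem.Dict.mk seg).getD "duration_estimate" 20)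

def compute_segment_timestamps (segments : List (List (String × Int))) : List String :=
  (segments.foldl pvStepA ([], 0)).1

-- ===== PORT B =====
-- "{}:{:02d}".format(*divmod(offset, 60)); divmod's divisor 60 ≠ 0, so it is (floordiv, mod)
def pvFmtOffset (o : Int) : String :=
  let dm := (PySem.Int.floordiv o 60, PySem.Int.mod o 60)
  PySem.Int.toStr dm.1 ++ ":" ++ pvFmt2 dm.2

def compute_segment_timestamps_alt (segments : List (List (String × Int))) : List String :=
  let durations := segments.map (fun seg => (PySem.Dict.mk seg).getD "duration_estimate" 20)
  -- durations[:i] with 0 ≤ i ≤ len is List.take i (exact)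
  let offsets := (List.range durations.length).map (fun i => (durations.take i).sum)
  offsets.map pvFmtOffset

-- ===== PRECONDITION & SPEC =====
def Spec_compute_segment_timestamps (segments : List (List (String × Int))) (out : List String) : Prop := out = compute_segment_timestamps_alt segments
instance (segments : List (List (String × Int))) (out : List String) : Decidable (Spec_compute_segment_timestamps segments out) := by unfold Spec_compute_segment_timestamps; infer_instance

-- ===== CLAIM (what is proved, stated in full; the proofs are below) =====
def Claim_equal_compute_segment_timestamps : Prop := ∀ (segments : List (List (String × Int))), Dom_compute_segment_timestamps segments → Spec_compute_segment_timestamps segments (compute_segment_timestamps segments)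

-- ===== LEMMAS AND PROOFS =====
-- invariant of A's loop: starting from (acc, c) it appends one formatted exclusive prefix offset per segment
theorem pvFoldA (segs : List (List (String × Int))) :
    ∀ (acc : List String) (c : Int),
      (segs.foldl pvStepA (acc, c)).1
        = acc ++ (List.range segs.length).map
            (fun i => pvFmtOffset (c + ((segs.map (fun seg => (PySem.Dict.mk seg).getD "duration_estimate" 20)).take i).sum)) := by
  induction segs with
  | nil => intro acc c; simp
  | cons s rest ih =>
    intro acc c
    simp only [List.foldl_cons, List.length_cons, List.range_succ_eq_map, List.map_cons,
      List.map_map]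
    rw [show pvStepA (acc, c) s
        = (acc ++ [PySem.Int.toStr (PySem.Int.floordiv c 60) ++ ":" ++ pvFmt2 (PySem.Int.mod c 60)],
           c + (PySem.Dict.mk s).getD "duration_estimate" 20) from rfl]
    rw [ih]
    simp [pvFmtOffset, Function.comp, add_assoc]

-- ===== VERDICT (by name: the statement is the Claim_ definition above) =====
theorem compute_segment_timestamps_spec : Claim_equal_compute_segment_timestamps := by
  intro segments _
  unfold Spec_compute_segment_timestamps compute_segment_timestamps compute_segment_timestamps_alt
  rw [pvFoldA]
  simp
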